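-- pv_equiv track=rewrite | github.com/Recon1991/Cobblemon-Spawndata-Extractor | bcgplus_spawndata_processor_v2.0.py | match_dex_numbers
-- ===== SOURCE A (Python) =====
-- def match_dex_numbers(spawn_dex, species_dex):
--     """
--     Match Dex numbers from spawn and species dictionaries and prepare them for processing.
--     Returns a dictionary with Dex numbers as keys and tuples containing (spawn archive,
--     spawn file, species archive, species file).
--     """
--     matched_dex = {}
--
--     all_dex_numbers = set(spawn_dex.keys()).union(set(species_dex.keys()))
--
--     for dex_number in all_dex_numbers:
--         spawn_info = spawn_dex.get(dex_number, (None, None, None))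
--         species_info = species_dex.get(dex_number, (None, None, None))
--
--         matched_dex[dex_number] = (
--             spawn_info[0],  # Spawn archive name
--             spawn_info[1],  # Spawn file name
--             spawn_info[2],  # Original spawn archive
--             species_info[0],  # Species archive name
--             species_info[1],  # Species file name
--             species_info[2]  # Original species archive
--         )
--
--     return matched_dex
-- ===== SOURCE B (Python) =====
-- def match_dex_numbers(spawn_dex, species_dex):
--     """Two-pass merge: seed from spawn_dex, then extend/insert from species_dex
--     (no key-set union, no per-key double lookup)."""
--     matched_dex = {}
--     for k, s in spawn_dex.items():
--         matched_dex[k] = (s[0], s[1], s[2], None, None, None)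
--     for k, sp in species_dex.items():
--         prev = matched_dex.get(k)
--         if prev is not None:
--             matched_dex[k] = (prev[0], prev[1], prev[2], sp[0], sp[1], sp[2])
--         else:
--             matched_dex[k] = (None, None, None, sp[0], sp[1], sp[2])
--     return matched_dex
-- ===== Notes on version B (the rewrite author's own statement) =====
-- stated objective: alternative
-- what changed: Replaced the key-set union plus dual get-with-default lookups per key by two direct passes: seed the result from spawn_dex, then a single pass over species_dex that extends existing entries or inserts species-only ones.
import Mathlib
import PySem

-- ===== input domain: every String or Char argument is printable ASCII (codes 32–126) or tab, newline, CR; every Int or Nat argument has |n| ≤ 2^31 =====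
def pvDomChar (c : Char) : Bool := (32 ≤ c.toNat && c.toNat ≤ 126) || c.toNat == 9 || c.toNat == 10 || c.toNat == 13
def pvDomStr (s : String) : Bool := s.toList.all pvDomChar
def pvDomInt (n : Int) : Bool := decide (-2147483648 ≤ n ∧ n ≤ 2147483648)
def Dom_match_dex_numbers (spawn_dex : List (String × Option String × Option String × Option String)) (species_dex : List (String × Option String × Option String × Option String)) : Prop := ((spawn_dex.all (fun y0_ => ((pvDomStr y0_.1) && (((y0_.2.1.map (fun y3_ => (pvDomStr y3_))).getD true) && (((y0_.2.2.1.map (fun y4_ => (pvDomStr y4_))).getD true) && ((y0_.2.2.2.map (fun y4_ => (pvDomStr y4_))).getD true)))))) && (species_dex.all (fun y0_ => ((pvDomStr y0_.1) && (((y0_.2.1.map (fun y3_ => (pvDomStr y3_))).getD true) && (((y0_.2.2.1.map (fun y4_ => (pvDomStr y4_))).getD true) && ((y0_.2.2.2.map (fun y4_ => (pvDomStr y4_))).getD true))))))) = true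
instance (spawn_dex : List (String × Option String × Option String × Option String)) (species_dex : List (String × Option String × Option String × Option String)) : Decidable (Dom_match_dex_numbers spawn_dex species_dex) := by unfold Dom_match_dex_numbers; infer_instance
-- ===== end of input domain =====

-- B replaces A's key-set union + dual getD lookups by two direct passes (seed from spawn_dex,
-- then extend/insert from species_dex); same result, alternative decomposition.

abbrev PvV3 := Option String × Option String × Option String
abbrev PvV6 := Option String × Option String × Option String × Option String × Option String × Option String

-- ===== PORT A =====
-- loop body of A's 'for dex_number in all_dex_numbers'
def pvStepA (spd sdd : PySem.Dict String PvV3) (m : PySem.Dict String PvV6) (k : String) : PySem.Dict String PvV6 :=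
  let s := spd.getD k (none, none, none)
  let q := sdd.getD k (none, none, none)
  m.insert k (s.1, s.2.1, s.2.2, q.1, q.2.1, q.2.2)

def match_dex_numbers (spawn_dex : List (String × Option String × Option String × Option String)) (species_dex : List (String × Option String × Option String × Option String)) : List (String × Option String × Option String × Option String × Option String × Option String × Option String) :=
  let spd : PySem.Dict String PvV3 := PySem.Dict.mk spawn_dex
  let sdd : PySem.Dict String PvV3 := PySem.Dict.mk species_dex
  let all_dex_numbers := PySem.Set.union (PySem.Set.ofList spd.keys) (PySem.Set.ofList sdd.keys)
  (all_dex_numbers.foldl (pvStepA spd sdd) PySem.Dict.empty).items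

-- ===== PORT B =====
-- loop body of B's first pass over spawn_dex.items()
def pvSeedB (m : PySem.Dict String PvV6) (p : String × PvV3) : PySem.Dict String PvV6 :=
  m.insert p.1 (p.2.1, p.2.2.1, p.2.2.2, none, none, none)

-- loop body of B's second pass over species_dex.items()
def pvStepB (m : PySem.Dict String PvV6) (p : String × PvV3) : PySem.Dict String PvV6 :=
  match m.get? p.1 with
  | some t => m.insert p.1 (t.1, t.2.1, t.2.2.1, p.2.1, p.2.2.1, p.2.2.2)
  | none   => m.insert p.1 (none, none, none, p.2.1, p.2.2.1, p.2.2.2)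

def match_dex_numbers_alt (spawn_dex : List (String × Option String × Option String × Option String)) (species_dex : List (String × Option String × Option String × Option String)) : List (String × Option String × Option String × Option String × Option String × Option String × Option String) :=
  let m1 := spawn_dex.foldl pvSeedB PySem.Dict.empty
  let m2 := species_dex.foldl pvStepB m1
  m2.items

-- ===== PRECONDITION & SPEC =====
-- Pre_ is the dict representation invariant only: association lists with unique keys.
-- Every Python dict satisfies it; it excludes no input the Python function can receive.
def Pre_match_dex_numbers (spawn_dex : List (String × Option String × Option String × Option String)) (species_dex : List (String × Option String × Option String × Option String)) : Prop :=
  (spawn_dex.map Prod.fst).Nodup ∧ (species_dex.map Prod.fst).Nodup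
instance (spawn_dex : List (String × Option String × Option String × Option String)) (species_dex : List (String × Option String × Option String × Option String)) : Decidable (Pre_match_dex_numbers spawn_dex species_dex) := by unfold Pre_match_dex_numbers; infer_instance

def pvWitness_match_dex_numbers : (List (String × Option String × Option String × Option String)) × (List (String × Option String × Option String × Option String)) :=
  ([("1", some "a", none, some "b")], [("1", some "c", some "d", none), ("2", none, none, some "e")])

def Spec_match_dex_numbers (spawn_dex : List (String × Option String × Option String × Option String)) (species_dex : List (String × Option String × Option String × Option String)) (out : List (String × Option String × Option String × Option String × Option String × Option String × Option String)) : Prop := out = match_dex_numbers_alt spawn_dex species_dex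
instance (spawn_dex : List (String × Option String × Option String × Option String)) (species_dex : List (String × Option String × Option String × Option String)) (out : List (String × Option String × Option String × Option String × Option String × Option String × Option String)) : Decidable (Spec_match_dex_numbers spawn_dex species_dex out) := by
  unfold Spec_match_dex_numbers
  haveI h7 : DecidableEq (String × Option String × Option String × Option String × Option String × Option String × Option String) := fun x y => by
    haveI h6 : DecidableEq (Option String × Option String × Option String × Option String × Option String × Option String) := fun u v => by infer_instance
    infer_instance
  infer_instance

-- ===== CLAIM (what is proved, stated in full; the proofs are below) =====
def Claim_equal_match_dex_numbers : Prop := ∀ (spawn_dex : List (String × Option String × Option String × Option String)) (species_dex : List (String × Option String × Option String × Option String)), Dom_match_dex_numbers spawn_dex species_dex → Pre_match_dex_numbers spawn_dex species_dex → Spec_match_dex_numbers spawn_dex species_dex (match_dex_numbers spawn_dex species_dex)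

-- ===== LEMMAS AND PROOFS =====

theorem pv_get?_mk (l : List (String × PvV3)) (k : String) :
    (PySem.Dict.mk l).get? k = (l.find? (fun p => p.1 == k)).map Prod.snd := by
  induction l with
  | nil => rfl
  | cons p rest ih =>
    obtain ⟨pk, pv⟩ := p
    rw [PySem.Dict.get?_mk_cons]
    by_cases h : pk = k
    · subst h; simp
    · simp [h, ih, List.find?_cons_of_neg]

theorem pv_keys_insert_eq_add (d : PySem.Dict String PvV6) (k : String) (v : PvV6) :
    (d.insert k v).keys = PySem.Set.add d.keys k := by
  by_cases h : d.contains k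
  · rw [PySem.Dict.keys_insert_of_contains _ _ h,
      PySem.Set.add_of_mem ((PySem.Dict.contains_iff_mem_keys d k).mp h)]
  · rw [PySem.Dict.keys_insert_of_not_contains _ _ (by simpa using h),
      PySem.Set.add_of_not_mem (fun hm => h ((PySem.Dict.contains_iff_mem_keys d k).mpr hm))]

-- the value A stores for key k
def pvFA (spd sdd : PySem.Dict String PvV3) (k : String) : PvV6 :=
  let s := spd.getD k (none, none, none)
  let q := sdd.getD k (none, none, none)
  (s.1, s.2.1, s.2.2, q.1, q.2.1, q.2.2)

theorem pv_keys_foldlA (spd sdd : PySem.Dict String PvV3) (l : List String) (d : PySem.Dict String PvV6) :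
    (l.foldl (pvStepA spd sdd) d).keys = PySem.Set.update d.keys l := by
  induction l generalizing d with
  | nil => rfl
  | cons x l ih =>
    rw [List.foldl_cons, PySem.Set.update_cons, ← pv_keys_insert_eq_add d x]
    exact ih _

theorem pv_getD_foldlA (spd sdd : PySem.Dict String PvV3) (l : List String) (d : PySem.Dict String PvV6) (k : String) :
    (l.foldl (pvStepA spd sdd) d).getD k (none, none, none, none, none, none) =
      if k ∈ l then pvFA spd sdd k else d.getD k (none, none, none, none, none, none) := by
  induction l generalizing d with
  | nil => simp
  | cons x l ih =>
    rw [List.foldl_cons, ih]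
    by_cases hl : k ∈ l
    · simp [hl]
    · by_cases hx : k = x
      · subst hx
        simp [hl, pvStepA, PySem.Dict.getD_insert_self, pvFA]
      · simp [hl, hx, pvStepA, PySem.Dict.getD_insert_of_ne _ _ _ hx]

theorem pv_keys_foldlSeed (l : List (String × PvV3)) (d : PySem.Dict String PvV6) :
    (l.foldl pvSeedB d).keys = PySem.Set.update d.keys (l.map Prod.fst) := by
  induction l generalizing d with
  | nil => rfl
  | cons p l ih =>
    rw [List.foldl_cons, List.map_cons, PySem.Set.update_cons, ← pv_keys_insert_eq_add d p.1]
    exact ih _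

theorem pv_keys_stepB (m : PySem.Dict String PvV6) (p : String × PvV3) :
    (pvStepB m p).keys = PySem.Set.add m.keys p.1 := by
  unfold pvStepB
  cases m.get? p.1 <;> simp [pv_keys_insert_eq_add]

theorem pv_keys_foldlB (l : List (String × PvV3)) (d : PySem.Dict String PvV6) :
    (l.foldl pvStepB d).keys = PySem.Set.update d.keys (l.map Prod.fst) := by
  induction l generalizing d with
  | nil => rfl
  | cons p l ih =>
    rw [List.foldl_cons, List.map_cons, PySem.Set.update_cons, ← pv_keys_stepB d p]
    exact ih _

theorem pv_get?_foldlSeed (l : List (String × PvV3)) (d : PySem.Dict String PvV6) (k : String)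
    (h : (l.map Prod.fst).Nodup) :
    (l.foldl pvSeedB d).get? k =
      match l.find? (fun p => p.1 == k) with
      | some p => some (p.2.1, p.2.2.1, p.2.2.2, none, none, none)
      | none => d.get? k := by
  induction l generalizing d with
  | nil => simp
  | cons p l ih =>
    simp only [List.map_cons, List.nodup_cons] at h
    rw [List.foldl_cons, ih _ h.2]
    by_cases hp : p.1 = k
    · have hnone : l.find? (fun q => q.1 == k) = none := by
        rw [List.find?_eq_none]
        intro q hq hbe
        exact h.1 (by rw [hp, ← eq_of_beq hbe]; exact List.mem_map_of_mem hq)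
      rw [hnone, List.find?_cons_of_pos (by simp [hp])]
      simp [pvSeedB, hp, PySem.Dict.get?_insert_self]
    · rw [List.find?_cons_of_neg (by simp [hp])]
      cases hf : l.find? (fun q => q.1 == k) with
      | some q => rfl
      | none => simp [pvSeedB, PySem.Dict.get?_insert_of_ne _ _ (fun h' => hp h'.symm)]

theorem pv_getD_foldlB (l : List (String × PvV3)) (m : PySem.Dict String PvV6) (k : String)
    (h : (l.map Prod.fst).Nodup) :
    (l.foldl pvStepB m).getD k (none, none, none, none, none, none) =
      match l.find? (fun p => p.1 == k) with
      | some p =>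
        (match m.get? k with
         | some t => (t.1, t.2.1, t.2.2.1, p.2.1, p.2.2.1, p.2.2.2)
         | none => (none, none, none, p.2.1, p.2.2.1, p.2.2.2))
      | none => m.getD k (none, none, none, none, none, none) := by
  induction l generalizing m with
  | nil => simp
  | cons p l ih =>
    simp only [List.map_cons, List.nodup_cons] at h
    rw [List.foldl_cons, ih _ h.2]
    by_cases hp : p.1 = k
    · have hnone : l.find? (fun q => q.1 == k) = none := by
        rw [List.find?_eq_none]
        intro q hq hbe
        exact h.1 (by rw [hp, ← eq_of_beq hbe]; exact List.mem_map_of_mem hq)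
      rw [hnone, List.find?_cons_of_pos (by simp [hp])]
      unfold pvStepB
      rw [hp]
      cases m.get? k <;> simp [PySem.Dict.getD_insert_self]
    · rw [List.find?_cons_of_neg (by simp [hp])]
      have hne : k ≠ p.1 := fun h' => hp h'.symm
      have hget : (pvStepB m p).get? k = m.get? k := by
        unfold pvStepB
        cases m.get? p.1 <;> simp [PySem.Dict.get?_insert_of_ne _ _ hne]
      have hgetD : (pvStepB m p).getD k (none, none, none, none, none, none) = m.getD k (none, none, none, none, none, none) := by
        unfold pvStepB
        cases m.get? p.1 <;> simp [PySem.Dict.getD_insert_of_ne _ _ _ hne]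
      cases hf : l.find? (fun q => q.1 == k) with
      | some q => rw [hget]
      | none => rw [hgetD]

-- ===== VERDICT (by name: the statement is the Claim_ definition above) =====
theorem match_dex_numbers_spec : Claim_equal_match_dex_numbers := by
  intro sp sd _hdom hpre
  obtain ⟨hsp, hsd⟩ := hpre
  unfold Spec_match_dex_numbers match_dex_numbers match_dex_numbers_alt
  simp only []
  -- abbreviations
  have hkmk_sp : (PySem.Dict.mk sp : PySem.Dict String PvV3).keys = sp.map Prod.fst := rfl
  have hkmk_sd : (PySem.Dict.mk sd : PySem.Dict String PvV3).keys = sd.map Prod.fst := rfl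
  set spK := sp.map Prod.fst with hspK
  set sdK := sd.map Prod.fst with hsdK
  have hofsp : PySem.Set.ofList spK = spK := PySem.Set.ofList_eq_self_of_nodup _ hsp
  have hofsd : PySem.Set.ofList sdK = sdK := PySem.Set.ofList_eq_self_of_nodup _ hsd
  have hunion : PySem.Set.union (PySem.Set.ofList spK) (PySem.Set.ofList sdK) = PySem.Set.update spK sdK := by
    rw [hofsp, hofsd]; rfl
  set K := PySem.Set.update spK sdK with hK
  have hKnodup : K.Nodup := by
    rw [hK]; exact PySem.Set.nodup_update _ _ hsp
  -- keys of both result dicts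
  set dA := (K.foldl (pvStepA (PySem.Dict.mk sp) (PySem.Dict.mk sd)) PySem.Dict.empty) with hdA
  set dB := (sd.foldl pvStepB (sp.foldl pvSeedB PySem.Dict.empty)) with hdB
  have hkA : dA.keys = K := by
    rw [hdA, pv_keys_foldlA, PySem.Dict.keys_empty, PySem.Set.update_nil_left,
      PySem.Set.ofList_eq_self_of_nodup _ hKnodup]
  have hkB : dB.keys = K := by
    rw [hdB, pv_keys_foldlB, pv_keys_foldlSeed, PySem.Dict.keys_empty,
      PySem.Set.update_nil_left, hofsp]
  rw [hkmk_sp, hkmk_sd, hunion]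
  show dA.items = dB.items
  rw [PySem.Dict.items_eq_map_keys dA (hkA ▸ hKnodup) (none, none, none, none, none, none),
      PySem.Dict.items_eq_map_keys dB (hkB ▸ hKnodup) (none, none, none, none, none, none),
      hkA, hkB]
  apply List.map_congr_left
  intro k hk
  congr 1
  -- value-wise equality at each key k ∈ K
  have hkmem : k ∈ spK ∨ k ∈ sdK := by
    have := (PySem.Set.mem_update _ _ _).mp (hK ▸ hk)
    exact this
  have hA : dA.getD k (none, none, none, none, none, none) = pvFA (PySem.Dict.mk sp) (PySem.Dict.mk sd) k := by
    rw [hdA, pv_getD_foldlA, if_pos hk]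
  rw [hA, hdB, pv_getD_foldlB _ _ _ hsd, pv_get?_foldlSeed _ _ _ hsp]
  unfold pvFA
  simp only [PySem.Dict.getD_eq_get?_getD, pv_get?_mk]
  cases hfsd : sd.find? (fun p => p.1 == k) with
  | some p =>
    cases hfsp : sp.find? (fun p => p.1 == k) with
    | some r => simp
    | none => simp
  | none =>
    have hknotsd : k ∉ sdK := by
      intro hm
      rw [hsdK] at hm
      obtain ⟨q, hq, hq1⟩ := List.mem_map.mp hm
      have := List.find?_eq_none.mp hfsd q hq
      simp [hq1] at this
    have hksp : k ∈ spK := hkmem.resolve_right hknotsd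
    obtain ⟨r, hr, hr1⟩ := List.mem_map.mp (hspK ▸ hksp)
    cases hfsp : sp.find? (fun p => p.1 == k) with
    | some q =>
      simp [pv_get?_foldlSeed _ _ _ hsp, hfsp]
    | none =>
      exact absurd (List.find?_eq_none.mp hfsp r hr) (by simp [hr1])
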